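-- pv_equiv track=rewrite | github.com/techfreaque/octobot-lorentzian-classification | source/tentacles/Meta/Keywords/basic_tentacles/matrix_basic_keywords/tools/utilities.py | _normalize_to_smaller_time_frame
-- ===== SOURCE A (Python) =====
-- def _normalize_to_smaller_time_frame(
--     candles_to_add, target_time_frame_timestamps, source_time_frame_timestamps, data
-- ):
--     first_full_index = 1
--     unified_data = []
--     # target timeframe is smaller
--     # adds last candle and finds second last index
--     for index in range(1, len(target_time_frame_timestamps)):
--         if source_time_frame_timestamps[-1] == target_time_frame_timestamps[-index]:
--             break
--         unified_data.insert(0, data[-1])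
--         first_full_index += 1
--
--     origin_data_len = len(data)
--     target_data_len = len(target_time_frame_timestamps)
--     data_index = 2
--     # normalize all other data
--     while first_full_index <= target_data_len and origin_data_len >= data_index:
--         virtual_candle_index = 1
--         while (
--             (virtual_candle_index <= candles_to_add)
--             and first_full_index <= target_data_len
--             and origin_data_len >= data_index
--         ):
--             virtual_candle_index += 1
--             unified_data.insert(0, data[-data_index])
--             first_full_index += 1
--         data_index += 1
--     return unified_data
-- ===== SOURCE B (Python) =====
-- def _normalize_to_smaller_time_frame(
--     candles_to_add, target_time_frame_timestamps, source_time_frame_timestamps, data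
-- ):
--     # Phase 1: count how many copies of data[-1] the break loop emits.
--     target_data_len = len(target_time_frame_timestamps)
--     copies = 0
--     for index in range(1, target_data_len):
--         if source_time_frame_timestamps[-1] == target_time_frame_timestamps[-index]:
--             break
--         copies += 1
--     seq = data[-1:] * copies  # forward order; reversed at the end
--     # Phase 2: per source candle, compute the repetition count arithmetically.
--     filled = 1 + copies
--     origin_data_len = len(data)
--     data_index = 2
--     while filled <= target_data_len and data_index <= origin_data_len:
--         reps = max(0, min(candles_to_add, target_data_len - filled + 1))
--         seq.extend([data[-data_index]] * reps)
--         filled += reps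
--         data_index += 1
--     return seq[::-1]
-- ===== Notes on version B (the rewrite author's own statement) =====
-- stated objective: faster
-- what changed: Replaces A's nested while loops that front-insert one element at a time (each insert(0,...) is O(len)) with a single forward loop computing each source candle's repetition count arithmetically (reps = max(0, min(candles_to_add, remaining))), extending a forward list and reversing once at the end.
import Mathlib
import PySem

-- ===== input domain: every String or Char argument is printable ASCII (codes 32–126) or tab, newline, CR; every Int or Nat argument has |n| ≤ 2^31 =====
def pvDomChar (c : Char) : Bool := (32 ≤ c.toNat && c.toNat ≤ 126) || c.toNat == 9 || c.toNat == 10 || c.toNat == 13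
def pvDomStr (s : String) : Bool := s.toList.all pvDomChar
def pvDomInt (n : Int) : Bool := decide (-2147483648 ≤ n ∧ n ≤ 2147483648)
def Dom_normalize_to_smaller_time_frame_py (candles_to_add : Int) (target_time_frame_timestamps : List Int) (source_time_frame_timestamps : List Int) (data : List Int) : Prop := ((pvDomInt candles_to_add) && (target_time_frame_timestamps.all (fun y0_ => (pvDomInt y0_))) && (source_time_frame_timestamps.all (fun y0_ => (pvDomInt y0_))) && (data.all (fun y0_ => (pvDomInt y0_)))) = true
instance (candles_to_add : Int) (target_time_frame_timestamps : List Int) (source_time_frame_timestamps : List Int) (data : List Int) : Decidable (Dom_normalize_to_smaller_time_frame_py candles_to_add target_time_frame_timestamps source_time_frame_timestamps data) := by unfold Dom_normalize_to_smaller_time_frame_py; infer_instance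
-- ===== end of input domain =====

-- B replaces A's nested front-inserting while loops by a count-based forward build with one final
-- reverse; objective: faster (A's insert(0, …) is linear per element).

-- ===== PORT A =====
-- phase-1 'for index in range(1, len(target))' with break; state (unified_data, first_full_index).
-- data[-1] / the == test use pyGet?; the .getD 0 default is only reached outside Pre_ (Python raises there).
def pvA_loop1 (tgt src data : List Int) : List Int → List Int × Int → List Int × Int
  | [], st => st
  | index :: rest, (uni, ffi) =>
    if PySem.List.pyGet? src (-1) = PySem.List.pyGet? tgt (-index) then (uni, ffi)
    else pvA_loop1 tgt src data rest ((PySem.List.pyGet? data (-1)).getD 0 :: uni, ffi + 1)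

-- the inner 'while virtual_candle_index <= candles_to_add and …' loop; fuel = (cta + 1 - vci).toNat
-- bounds the iterations exactly (fuel = 0 ↔ vci > cta, where the Python loop also stops)
def pvA_inner (cta tdl odl di : Int) (data : List Int) : Nat → Int → List Int → Int → List Int × Int
  | 0, _, uni, ffi => (uni, ffi)
  | fuel + 1, vci, uni, ffi =>
    if vci ≤ cta ∧ ffi ≤ tdl ∧ di ≤ odl then
      pvA_inner cta tdl odl di data fuel (vci + 1) ((PySem.List.pyGet? data (-di)).getD 0 :: uni) (ffi + 1)
    else (uni, ffi)

-- the outer 'while first_full_index <= target_data_len and origin_data_len >= data_index' loop;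
-- fuel = (odl + 1 - di).toNat (fuel = 0 ↔ di > odl, where the Python loop also stops)
def pvA_outer (cta tdl odl : Int) (data : List Int) : Nat → Int → List Int → Int → List Int
  | 0, _, uni, _ => uni
  | fuel + 1, di, uni, ffi =>
    if ffi ≤ tdl ∧ di ≤ odl then
      let p := pvA_inner cta tdl odl di data cta.toNat 1 uni ffi
      pvA_outer cta tdl odl data fuel (di + 1) p.1 p.2
    else uni

def normalize_to_smaller_time_frame_py (candles_to_add : Int) (target_time_frame_timestamps : List Int) (source_time_frame_timestamps : List Int) (data : List Int) : List Int :=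
  let st := pvA_loop1 target_time_frame_timestamps source_time_frame_timestamps data
              (PySem.List.pyRange 1 (target_time_frame_timestamps.length : Int) 1) ([], 1)
  pvA_outer candles_to_add (target_time_frame_timestamps.length : Int) (data.length : Int) data
    ((data.length : Int) - 1).toNat 2 st.1 st.2

-- ===== PORT B =====
-- phase-1 break loop of B: only counts how many copies the loop emits
def pvB_copies (tgt src : List Int) : List Int → Nat
  | [] => 0
  | index :: rest =>
    if PySem.List.pyGet? src (-1) = PySem.List.pyGet? tgt (-index) then 0
    else pvB_copies tgt src rest + 1

-- B's single forward while loop: reps computed arithmetically, appended at the back;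
-- fuel = (odl + 1 - di).toNat bounds the iterations exactly
def pvB_loop (cta tdl odl : Int) (data : List Int) : Nat → Int → Int → List Int → List Int
  | 0, _, _, acc => acc
  | fuel + 1, filled, di, acc =>
    if filled ≤ tdl ∧ di ≤ odl then
      let reps := max 0 (min cta (tdl - filled + 1))
      pvB_loop cta tdl odl data fuel (filled + reps) (di + 1)
        (acc ++ List.replicate reps.toNat ((PySem.List.pyGet? data (-di)).getD 0))
    else acc

def normalize_to_smaller_time_frame_py_alt (candles_to_add : Int) (target_time_frame_timestamps : List Int) (source_time_frame_timestamps : List Int) (data : List Int) : List Int :=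
  let copies := pvB_copies target_time_frame_timestamps source_time_frame_timestamps
                  (PySem.List.pyRange 1 (target_time_frame_timestamps.length : Int) 1)
  let seq0 := PySem.List.pyRepeat (PySem.List.slice data (some (-1)) none) (copies : Int)  -- data[-1:] * copies
  (pvB_loop candles_to_add (target_time_frame_timestamps.length : Int) (data.length : Int) data
      ((data.length : Int) - 1).toNat (1 + (copies : Int)) 2 seq0).reverse

-- ===== PRECONDITION & SPEC =====
-- Pre_ excludes exactly the inputs where A raises IndexError: source[-1] with empty source (when the
-- phase-1 loop runs at all, i.e. len(target) ≥ 2), and data[-1] with empty data (when the loop body fires,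
-- i.e. len(target) ≥ 2 and source[-1] ≠ target[-1]).
def Pre_normalize_to_smaller_time_frame_py (candles_to_add : Int) (target_time_frame_timestamps : List Int) (source_time_frame_timestamps : List Int) (data : List Int) : Prop :=
  target_time_frame_timestamps.length ≤ 1 ∨
    (source_time_frame_timestamps ≠ [] ∧
      (PySem.List.pyGet? source_time_frame_timestamps (-1) = PySem.List.pyGet? target_time_frame_timestamps (-1)
        ∨ data ≠ []))
instance (candles_to_add : Int) (target_time_frame_timestamps : List Int) (source_time_frame_timestamps : List Int) (data : List Int) : Decidable (Pre_normalize_to_smaller_time_frame_py candles_to_add target_time_frame_timestamps source_time_frame_timestamps data) := by unfold Pre_normalize_to_smaller_time_frame_py; infer_instance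

def pvWitness_normalize_to_smaller_time_frame_py : Int × List Int × List Int × List Int :=
  (2, [10, 20, 30], [30], [7, 8])

def Spec_normalize_to_smaller_time_frame_py (candles_to_add : Int) (target_time_frame_timestamps : List Int) (source_time_frame_timestamps : List Int) (data : List Int) (out : List Int) : Prop := out = normalize_to_smaller_time_frame_py_alt candles_to_add target_time_frame_timestamps source_time_frame_timestamps data
instance (candles_to_add : Int) (target_time_frame_timestamps : List Int) (source_time_frame_timestamps : List Int) (data : List Int) (out : List Int) : Decidable (Spec_normalize_to_smaller_time_frame_py candles_to_add target_time_frame_timestamps source_time_frame_timestamps data out) := by unfold Spec_normalize_to_smaller_time_frame_py; infer_instance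

-- ===== CLAIM (what is proved, stated in full; the proofs are below) =====
def Claim_equal_normalize_to_smaller_time_frame_py : Prop := ∀ (candles_to_add : Int) (target_time_frame_timestamps : List Int) (source_time_frame_timestamps : List Int) (data : List Int), Dom_normalize_to_smaller_time_frame_py candles_to_add target_time_frame_timestamps source_time_frame_timestamps data → Pre_normalize_to_smaller_time_frame_py candles_to_add target_time_frame_timestamps source_time_frame_timestamps data → Spec_normalize_to_smaller_time_frame_py candles_to_add target_time_frame_timestamps source_time_frame_timestamps data (normalize_to_smaller_time_frame_py candles_to_add target_time_frame_timestamps source_time_frame_timestamps data)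

-- ===== LEMMAS AND PROOFS =====

-- Phase 1: A's break loop produces exactly (pvB_copies …) front-inserted copies of data[-1].
theorem pvA_loop1_eq (tgt src data : List Int) (idxs : List Int) (uni : List Int) (ffi : Int) :
    pvA_loop1 tgt src data idxs (uni, ffi) =
      (List.replicate (pvB_copies tgt src idxs) ((PySem.List.pyGet? data (-1)).getD 0) ++ uni,
        ffi + (pvB_copies tgt src idxs : Int)) := by
  induction idxs generalizing uni ffi with
  | nil => simp [pvA_loop1, pvB_copies]
  | cons i rest ih =>
    simp only [pvA_loop1, pvB_copies]
    split
    · simp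
    · rw [ih]
      simp only [Prod.mk.injEq]
      constructor
      · rw [List.replicate_succ']
        simp
      · push_cast
        ring

-- Inner while loop: closed-form repetition count (fuel must dominate the loop's own bound).
theorem pvA_inner_eq (cta tdl odl di : Int) (data : List Int) (fuel : Nat) (vci : Int)
    (uni : List Int) (ffi : Int) (hdi : di ≤ odl) (hf : (cta + 1 - vci).toNat ≤ fuel) :
    pvA_inner cta tdl odl di data fuel vci uni ffi =
      (List.replicate (max 0 (min (cta + 1 - vci) (tdl + 1 - ffi))).toNat
          ((PySem.List.pyGet? data (-di)).getD 0) ++ uni,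
        ffi + max 0 (min (cta + 1 - vci) (tdl + 1 - ffi))) := by
  induction fuel generalizing vci uni ffi with
  | zero =>
    have : max 0 (min (cta + 1 - vci) (tdl + 1 - ffi)) = 0 := by omega
    simp [pvA_inner, this]
  | succ fuel ih =>
    rw [pvA_inner]
    split
    · rename_i h
      rw [ih (vci + 1) _ (ffi + 1) (by omega)]
      have h1 : (max 0 (min (cta + 1 - vci) (tdl + 1 - ffi))).toNat
          = (max 0 (min (cta + 1 - (vci + 1)) (tdl + 1 - (ffi + 1)))).toNat + 1 := by omega
      simp only [Prod.mk.injEq]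
      constructor
      · rw [h1, List.replicate_succ']
        simp
      · omega
    · rename_i h
      have : max 0 (min (cta + 1 - vci) (tdl + 1 - ffi)) = 0 := by omega
      simp [this]

-- Outer loop of A versus B's forward loop: A front-inserts what B appends, so A = reverse of B.
theorem pvA_outer_eq (cta tdl odl : Int) (data : List Int) (fuel : Nat) (di ffi : Int)
    (acc : List Int) (hf : (odl + 1 - di).toNat ≤ fuel) :
    pvA_outer cta tdl odl data fuel di acc.reverse ffi =
      (pvB_loop cta tdl odl data fuel ffi di acc).reverse := by
  induction fuel generalizing di ffi acc with
  | zero => simp [pvA_outer, pvB_loop]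
  | succ fuel ih =>
    rw [pvA_outer, pvB_loop]
    split
    · rename_i h
      rw [pvA_inner_eq cta tdl odl di data cta.toNat 1 acc.reverse ffi h.2 (by omega)]
      have hrep : List.replicate (max 0 (min (cta + 1 - 1) (tdl + 1 - ffi))).toNat
            ((PySem.List.pyGet? data (-di)).getD 0) ++ acc.reverse
          = (acc ++ List.replicate (max 0 (min cta (tdl - ffi + 1))).toNat
              ((PySem.List.pyGet? data (-di)).getD 0)).reverse := by
        rw [List.reverse_append, List.reverse_replicate]
        congr 2
        omega
      have hffi : ffi + max 0 (min (cta + 1 - 1) (tdl + 1 - ffi))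
          = ffi + max 0 (min cta (tdl - ffi + 1)) := by omega
      simp only [hrep, hffi]
      exact ih (di + 1) _ _ (by omega)
    · rfl

-- If data = [] then (under Pre_) the phase-1 count is 0.
theorem pvB_copies_zero (tgt src : List Int)
    (h : (tgt.length ≤ 1) ∨ PySem.List.pyGet? src (-1) = PySem.List.pyGet? tgt (-1)) :
    pvB_copies tgt src (PySem.List.pyRange 1 (tgt.length : Int) 1) = 0 := by
  rcases h with h | h
  · rw [PySem.List.pyRange_one_eq_nil (by exact_mod_cast h)]
    rfl
  · by_cases h2 : (tgt.length : Int) ≤ 1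
    · rw [PySem.List.pyRange_one_eq_nil h2]
      rfl
    · rw [PySem.List.pyRange_one_cons (by omega)]
      simp [pvB_copies, h]

-- data[-1:] * k is k copies of data[-1] when data ≠ [].
theorem pyRepeat_lastslice (data : List Int) (hd : data ≠ []) (k : Nat) :
    PySem.List.pyRepeat (PySem.List.slice data (some (-1)) none) (k : Int)
      = List.replicate k ((PySem.List.pyGet? data (-1)).getD 0) := by
  have h1 : PySem.List.slice data (some (-1)) none = [(PySem.List.pyGet? data (-1)).getD 0] := by
    rw [PySem.List.slice_from_neg_one, PySem.List.pyGet?_neg_one]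
    induction data with
    | nil => simp at hd
    | cons a rest ih =>
      cases rest with
      | nil => simp
      | cons b r =>
        simpa using ih (by simp)
  rw [h1, PySem.List.pyRepeat_singleton]
  simp

-- ===== VERDICT (by name: the statement is the Claim_ definition above) =====
theorem normalize_to_smaller_time_frame_py_spec : Claim_equal_normalize_to_smaller_time_frame_py := by
  intro cta tgt src data _ hpre
  unfold Spec_normalize_to_smaller_time_frame_py
  unfold normalize_to_smaller_time_frame_py normalize_to_smaller_time_frame_py_alt
  simp only []
  set k := pvB_copies tgt src (PySem.List.pyRange 1 (tgt.length : Int) 1) with hk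
  rw [pvA_loop1_eq]
  by_cases hd : data = []
  · subst hd
    have hk0 : k = 0 := by
      apply pvB_copies_zero
      unfold Pre_normalize_to_smaller_time_frame_py at hpre
      rcases hpre with h | ⟨_, h | h⟩
      · exact Or.inl h
      · exact Or.inr h
      · simp at h
    rw [← hk, hk0]
    have hrep : PySem.List.pyRepeat (PySem.List.slice ([] : List Int) (some (-1)) none) ((0 : Nat) : Int) = ([] : List Int) := by
      simp [PySem.List.pyRepeat, PySem.List.slice]
    rw [hrep]
    simpa using pvA_outer_eq cta (tgt.length : Int) 0 [] ((0 : Int) - 1).toNat 2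
      (1 + ((0 : Nat) : Int)) [] (by omega)
  · rw [← hk, pyRepeat_lastslice data hd k]
    have := pvA_outer_eq cta (tgt.length : Int) (data.length : Int) data
      ((data.length : Int) - 1).toNat 2 (1 + (k : Int))
      (List.replicate k ((PySem.List.pyGet? data (-1)).getD 0)) (by omega)
    rw [List.reverse_replicate] at this
    simpa using this
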